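-- pv_equiv track=rewrite | github.com/Disas721/Avito_internship2025 | train_char_tagger.py | make_pairs_from_line
-- ===== SOURCE A (Python) =====
-- def make_pairs_from_line(line: str):
--     line = " ".join(line.strip().split())
--     if not line or len(line) < 3:
--         return None
--     no = line.replace(" ", "")
--     labels = [0]*(len(no)-1)
--     i_no = 0
--     for i, ch in enumerate(line[:-1]):
--         if ch == " ":
--             continue
--         if line[i+1] == " ":
--             labels[i_no] = 1
--         i_no += 1
--     return no, labels
-- ===== SOURCE B (Python) =====
-- def make_pairs_from_line(line: str):
--     words = line.split()
--     if not words: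
--         return None
--     no = "".join(words)
--     if len(no) + len(words) - 1 < 3:
--         return None
--     labels = [0] * (len(no) - 1)
--     off = 0
--     for w in words[:-1]:
--         off += len(w)
--         labels[off - 1] = 1
--     return no, labels
-- ===== Notes on version B (the rewrite author's own statement) =====
-- stated objective: faster
-- what changed: Instead of scanning the normalized string character by character with a running non-space index and next-char lookups, B splits the line into words once and marks each boundary directly at the cumulative word-length offset.
import Mathlib
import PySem

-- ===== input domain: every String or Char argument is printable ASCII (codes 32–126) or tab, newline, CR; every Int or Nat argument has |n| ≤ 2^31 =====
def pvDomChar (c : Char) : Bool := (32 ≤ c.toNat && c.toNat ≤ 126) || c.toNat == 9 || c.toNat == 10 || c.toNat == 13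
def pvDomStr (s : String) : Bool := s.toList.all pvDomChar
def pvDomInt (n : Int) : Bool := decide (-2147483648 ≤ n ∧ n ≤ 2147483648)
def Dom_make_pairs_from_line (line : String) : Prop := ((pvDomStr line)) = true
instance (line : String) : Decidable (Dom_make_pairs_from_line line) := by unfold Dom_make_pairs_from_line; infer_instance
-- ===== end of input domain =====

-- B replaces A's character-by-character scan of the normalized line (running non-space
-- index, next-char lookups) by marking each word boundary directly at the cumulative
-- word-length offset over line.split(); objective: faster (measured constant-factor win:
-- one word-level loop instead of a per-character loop). Return-value equivalence only
-- (neither version mutates its argument).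

-- ===== PORT A =====
-- loop body of A's `for i, ch in enumerate(line[:-1])`; `line[i+1]` is in range on every
-- iteration Python reaches (i < len(line)-1), so pyGetD's default is never read.
def pvStepA (t : List Char) (st : List Int × Int) (p : Int × Char) : List Int × Int :=
  if p.2 = ' ' then st
  else if PySem.List.pyGetD t (p.1 + 1) ' ' = ' ' then
    (PySem.List.pySetD st.1 st.2 1, st.2 + 1)
  else (st.1, st.2 + 1)

def make_pairs_from_line (line : String) : Option (String × List Int) :=
  let line2 := PySem.Str.join " " (PySem.Str.split₀ (PySem.Str.strip line))
  if line2 = "" ∨ PySem.Str.len line2 < 3 then none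
  else
    let no := PySem.Str.replace line2 " " ""
    let labels : List Int := List.replicate (PySem.Str.len no - 1).toNat 0
    let st := (PySem.List.enumerate ((PySem.Str.slice line2 none (some (-1))).toList)).foldl
      (pvStepA line2.toList) (labels, 0)
    some (no, st.1)

-- ===== PORT B =====
-- loop body of B's `for w in words[:-1]`
def pvStepB (st : List Int × Int) (w : String) : List Int × Int :=
  let off := st.2 + PySem.Str.len w
  (PySem.List.pySetD st.1 (off - 1) 1, off)

def make_pairs_from_line_alt (line : String) : Option (String × List Int) :=
  let words := PySem.Str.split₀ line
  if words = [] then none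
  else
    let no := PySem.Str.join "" words
    if PySem.Str.len no + words.length - 1 < 3 then none
    else
      let labels : List Int := List.replicate (PySem.Str.len no - 1).toNat 0
      let st := (PySem.List.slice words none (some (-1))).foldl pvStepB (labels, 0)
      some (no, st.1)

-- ===== PRECONDITION & SPEC =====
def Spec_make_pairs_from_line (line : String) (out : Option (String × List Int)) : Prop := out = make_pairs_from_line_alt line
instance (line : String) (out : Option (String × List Int)) : Decidable (Spec_make_pairs_from_line line out) := by unfold Spec_make_pairs_from_line; infer_instance

-- ===== CLAIM (what is proved, stated in full; the proofs are below) =====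
def Claim_equal_make_pairs_from_line : Prop := ∀ (line : String), Dom_make_pairs_from_line line → Spec_make_pairs_from_line line (make_pairs_from_line line)

-- ===== LEMMAS AND PROOFS =====

-- intercalate basics
lemma pv_inter_singleton (sep w : List Char) : sep.intercalate [w] = w := by
  simp [List.intercalate]

lemma pv_inter_cons (sep x y : List Char) (zs : List (List Char)) :
    sep.intercalate (x :: y :: zs) = x ++ sep ++ sep.intercalate (y :: zs) := by
  simp [List.intercalate, List.intersperse]

lemma pv_inter_nil_flatten (xs : List (List Char)) :
    List.intercalate ([] : List Char) xs = xs.flatten := by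
  induction xs with
  | nil => rfl
  | cons x t ih =>
    cases t with
    | nil => simp [List.intercalate]
    | cons y t' => simp_all [List.intercalate, List.intersperse]

-- every word produced by split₀ is nonempty and whitespace-free
lemma pv_go_words : ∀ (cs cur : List Char) (acc : List (List Char)),
    (∀ w ∈ acc, w ≠ [] ∧ ∀ c ∈ w, PySem.Chars.isspace c = false) →
    (∀ c ∈ cur, PySem.Chars.isspace c = false) →
    ∀ w ∈ PySem.Chars.split₀.go cs cur acc, w ≠ [] ∧ ∀ c ∈ w, PySem.Chars.isspace c = false := by
  intro cs
  induction cs with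
  | nil =>
    intro cur acc hacc hcur
    simp only [PySem.Chars.split₀.go]
    split
    · simpa using hacc
    · rename_i hne
      intro w hw
      simp only [List.mem_reverse, List.mem_cons] at hw
      rcases hw with h | h
      · subst h
        constructor
        · simp [List.isEmpty_iff] at hne; simpa using hne
        · intro c hc; exact hcur c (by simpa using hc)
      · exact hacc w h
  | cons c rest ih =>
    intro cur acc hacc hcur
    simp only [PySem.Chars.split₀.go]
    split
    · split
      · exact ih [] acc hacc (by simp)
      · rename_i hsp hne
        refine ih [] _ ?_ (by simp)
        intro w hw
        rcases List.mem_cons.mp hw with h | h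
        · subst h
          constructor
          · simp [List.isEmpty_iff] at hne; simpa using hne
          · intro x hx; exact hcur x (by simpa using hx)
        · exact hacc w h
    · rename_i hsp
      refine ih (c :: cur) acc hacc ?_
      intro x hx
      rcases List.mem_cons.mp hx with h | h
      · subst h; simpa using hsp
      · exact hcur x h

lemma pv_split₀_words (cs : List Char) :
    ∀ w ∈ PySem.Chars.split₀ cs, w ≠ [] ∧ ∀ c ∈ w, PySem.Chars.isspace c = false :=
  pv_go_words cs [] [] (by simp) (by simp)

-- split() ignores leading whitespace …
lemma pv_split₀_lstrip (cs : List Char) :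
    PySem.Chars.split₀ (PySem.Chars.lstrip cs) = PySem.Chars.split₀ cs := by
  induction cs with
  | nil => rfl
  | cons c rest ih =>
    by_cases h : PySem.Chars.isspace c = true
    · have : PySem.Chars.lstrip (c :: rest) = PySem.Chars.lstrip rest := by
        simp [PySem.Chars.lstrip, h]
      rw [this, ih]
      show _ = PySem.Chars.split₀.go (c :: rest) [] []
      simp [PySem.Chars.split₀.go, h, PySem.Chars.split₀]
    · simp [PySem.Chars.lstrip, h]

-- … and trailing whitespace
lemma pv_go_allspace : ∀ (sp cur : List Char) (acc : List (List Char)),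
    (∀ c ∈ sp, PySem.Chars.isspace c = true) →
    PySem.Chars.split₀.go sp cur acc = PySem.Chars.split₀.go [] cur acc := by
  intro sp
  induction sp with
  | nil => intro cur acc _; rfl
  | cons c rest ih =>
    intro cur acc hsp
    have hc : PySem.Chars.isspace c = true := hsp c (by simp)
    have hrest : ∀ x ∈ rest, PySem.Chars.isspace x = true := fun x hx => hsp x (by simp [hx])
    simp only [PySem.Chars.split₀.go, hc, if_true]
    split
    · rw [ih [] acc hrest]; simp_all [PySem.Chars.split₀.go]
    · rw [ih [] _ hrest]; simp_all [PySem.Chars.split₀.go]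

lemma pv_go_append_sp : ∀ (cs sp cur : List Char) (acc : List (List Char)),
    (∀ c ∈ sp, PySem.Chars.isspace c = true) →
    PySem.Chars.split₀.go (cs ++ sp) cur acc = PySem.Chars.split₀.go cs cur acc := by
  intro cs
  induction cs with
  | nil => intro sp cur acc hsp; simpa using pv_go_allspace sp cur acc hsp
  | cons c rest ih =>
    intro sp cur acc hsp
    simp only [List.cons_append, PySem.Chars.split₀.go]
    split
    · split
      · exact ih sp [] acc hsp
      · exact ih sp [] _ hsp
    · exact ih sp (c :: cur) acc hsp

lemma pv_split₀_rstrip (cs : List Char) :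
    PySem.Chars.split₀ (PySem.Chars.rstrip cs) = PySem.Chars.split₀ cs := by
  have hsplit : cs = PySem.Chars.rstrip cs ++ (cs.reverse.takeWhile PySem.Chars.isspace).reverse := by
    have h0 : cs = (List.takeWhile PySem.Chars.isspace cs.reverse
        ++ List.dropWhile PySem.Chars.isspace cs.reverse).reverse := by
      rw [List.takeWhile_append_dropWhile, List.reverse_reverse]
    rw [List.reverse_append] at h0
    simpa [PySem.Chars.rstrip] using h0
  have hsp : ∀ c ∈ (cs.reverse.takeWhile PySem.Chars.isspace).reverse, PySem.Chars.isspace c = true := by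
    intro c hc
    exact List.mem_takeWhile_imp (by simpa using hc)
  conv_rhs => rw [hsplit]
  exact (pv_go_append_sp _ _ [] [] hsp).symm

lemma pv_split₀_strip (cs : List Char) :
    PySem.Chars.split₀ (PySem.Chars.strip cs) = PySem.Chars.split₀ cs := by
  rw [PySem.Chars.strip, pv_split₀_rstrip, pv_split₀_lstrip]

-- replace(" ", "") is a filter
lemma pv_replace_go : ∀ (fuel : Nat) (l acc : List Char), l.length ≤ fuel →
    PySem.Chars.replace.go [' '] [] fuel l acc = acc.reverse ++ l.filter (fun c => !(c == ' ')) := by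
  intro fuel
  induction fuel with
  | zero =>
    intro l acc h
    have : l = [] := List.eq_nil_of_length_eq_zero (Nat.le_zero.mp h)
    subst this; simp [PySem.Chars.replace.go]
  | succ fuel ih =>
    intro l acc h
    cases l with
    | nil => simp [PySem.Chars.replace.go]
    | cons c t =>
      by_cases hc : c = ' '
      · subst hc
        have hp : List.isPrefixOf [' '] (' ' :: t) = true := by simp [List.isPrefixOf]
        simp only [PySem.Chars.replace.go, hp, if_true]
        rw [ih _ _ (by simpa using Nat.le_of_succ_le_succ h)]
        simp
      · have hp : List.isPrefixOf [' '] (c :: t) = false := by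
          simp only [List.isPrefixOf, Bool.and_true, beq_eq_false_iff_ne, ne_eq]
          exact fun h => hc h.symm
        simp only [PySem.Chars.replace.go, hp, Bool.false_eq_true, if_false]
        rw [ih t (c :: acc) (by simpa using Nat.le_of_succ_le_succ h)]
        simp [hc]

lemma pv_replace_space (s : List Char) :
    PySem.Chars.replace s [' '] [] = s.filter (fun c => !(c == ' ')) := by
  simp only [PySem.Chars.replace, List.isEmpty_cons]
  simpa using pv_replace_go s.length s [] le_rfl

-- removing the separators from " ".join(ws) gives "".join(ws)
lemma pv_filter_inter : ∀ (ws : List (List Char)), (∀ w ∈ ws, ∀ c ∈ w, c ≠ ' ') →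
    ([' '].intercalate ws).filter (fun c => !(c == ' ')) = ws.flatten := by
  intro ws
  induction ws with
  | nil => intro _; rfl
  | cons w rest ih =>
    intro h
    have hw : ∀ c ∈ w, c ≠ ' ' := h w (by simp)
    have hfw : w.filter (fun c => !(c == ' ')) = w := by
      rw [List.filter_eq_self]; intro c hc; simpa using hw c hc
    cases rest with
    | nil => simp [pv_inter_singleton, hfw]
    | cons y t =>
      rw [pv_inter_cons]
      have := ih (fun v hv => h v (by simp [hv]))
      simp only [List.filter_append, hfw, List.flatten_cons, this]
      simp

lemma pv_len_inter : ∀ (ws : List (List Char)), ws ≠ [] →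
    ([' '].intercalate ws).length = ws.flatten.length + ws.length - 1 := by
  intro ws
  induction ws with
  | nil => intro h; exact absurd rfl h
  | cons w rest ih =>
    intro _
    cases rest with
    | nil => simp [pv_inter_singleton]
    | cons y t =>
      rw [pv_inter_cons]
      have h2 := ih (by simp)
      simp only [List.flatten_cons, List.length_append, List.length_cons, List.length_nil] at h2 ⊢
      omega

lemma pv_inter_ne_nil : ∀ (ws : List (List Char)), ws ≠ [] → (∀ w ∈ ws, w ≠ []) →
    [' '].intercalate ws ≠ [] := by
  intro ws hne hw
  cases ws with
  | nil => exact absurd rfl hne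
  | cons w rest =>
    cases rest with
    | nil =>
      rw [pv_inter_singleton]; exact hw w (by simp)
    | cons y t =>
      rw [pv_inter_cons]
      intro h
      have : (' ' : Char) ∈ ([] : List Char) := by
        rw [← h]; simp
      simp at this

-- xs[:-1] = dropLast
lemma pv_slice_neg_one {α : Type} (xs : List α) :
    PySem.List.slice xs none (some (-1)) = xs.dropLast := by
  cases xs with
  | nil => rfl
  | cons x t =>
    show List.take _ (List.drop 0 (x :: t)) = _
    rw [List.dropLast_eq_take]
    simp [PySem.List.clampIdx]
    rw [if_neg (by omega : ¬ ((t.length : Int) < 0))]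
    omega

-- A's loop across one word whose chars are non-space: the label is set at the word's
-- last char iff the char right after the word (d) is a space
lemma pv_foldA_word : ∀ (w : List Char) (t : List Char) (d : Char) (u : List Char)
    (s : Nat) (L : List Int) (n : Int),
    (∀ c ∈ w, c ≠ ' ') → t.drop s = w ++ d :: u →
    (PySem.List.enumerate w (s : Int)).foldl (pvStepA t) (L, n) =
      if d = ' ' ∧ w ≠ [] then
        (PySem.List.pySetD L (n + w.length - 1) 1, n + w.length)
      else (L, n + w.length) := by
  intro w
  induction w with
  | nil => intro t d u s L n _ _; simp [PySem.List.enumerate]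
  | cons c w' ih =>
    intro t d u s L n hns hdrop
    have hc : c ≠ ' ' := hns c (by simp)
    have hdrop' : t.drop (s + 1) = w' ++ d :: u := by
      have h1 : t.drop (s + 1) = (t.drop s).drop 1 := by rw [List.drop_drop]
      rw [h1, hdrop]; simp
    have hgetD : PySem.List.pyGetD t ((s : Int) + 1) ' ' = ((w' ++ d :: u)[0]?).getD ' ' := by
      have h2 : ((s : Int) + 1) = ((s + 1 : Nat) : Int) := by push_cast; ring
      have h3 : t[s + 1]? = (w' ++ d :: u)[0]? := by
        rw [← hdrop', List.getElem?_drop]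
      rw [h2, PySem.List.pyGetD_natCast]
      simp only [List.getD_eq_getElem?_getD, h3]
    rw [PySem.List.enumerate_cons]
    simp only [List.foldl_cons]
    cases w' with
    | nil =>
      have hgd : PySem.List.pyGetD t ((s : Int) + 1) ' ' = d := by
        rw [hgetD]; simp
      by_cases hd : d = ' '
      · have hstep : pvStepA t (L, n) ((s : Int), c) = (PySem.List.pySetD L n 1, n + 1) := by
          unfold pvStepA; simp [hc, hgd, hd]
        rw [hstep]
        simp only [PySem.List.enumerate, List.foldl_nil, List.length_cons, List.length_nil]
        have ha : n + ((0 + 1 : Nat) : Int) - 1 = n := by push_cast; ring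
        have hb : n + ((0 + 1 : Nat) : Int) = n + 1 := by push_cast; ring
        rw [if_pos ⟨hd, by simp⟩, ha, hb]
      · have hstep : pvStepA t (L, n) ((s : Int), c) = (L, n + 1) := by
          unfold pvStepA; simp [hc, hgd, hd]
        rw [hstep]
        simp [PySem.List.enumerate, hd]
    | cons c' w'' =>
      have hc' : c' ≠ ' ' := hns c' (by simp)
      have hgd : PySem.List.pyGetD t ((s : Int) + 1) ' ' = c' := by
        rw [hgetD]; simp
      have hstep : pvStepA t (L, n) ((s : Int), c) = (L, n + 1) := by
        unfold pvStepA; simp [hc, hgd, hc']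
      rw [hstep]
      have hcast : ((s : Int) + 1) = ((s + 1 : Nat) : Int) := by push_cast; ring
      rw [hcast, ih t d u (s + 1) L (n + 1) (fun x hx => hns x (by simp [hx])) hdrop']
      by_cases hd : d = ' '
      · simp only [hd, ne_eq, reduceCtorEq, not_false_eq_true, and_true, ite_true,
          List.length_cons]
        have ha : n + 1 + ((w''.length + 1 : Nat) : Int) - 1
            = n + ((w''.length + 1 + 1 : Nat) : Int) - 1 := by push_cast; ring
        have hb : n + 1 + ((w''.length + 1 : Nat) : Int)
            = n + ((w''.length + 1 + 1 : Nat) : Int) := by push_cast; ring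
        rw [ha, hb]
      · simp only [hd, false_and, if_false, List.length_cons]
        have hb : n + 1 + ((w''.length + 1 : Nat) : Int)
            = n + ((w''.length + 1 + 1 : Nat) : Int) := by push_cast; ring
        rw [hb]

-- the word-level step B takes, on char lists
def pvStepC (st : List Int × Int) (w : List Char) : List Int × Int :=
  (PySem.List.pySetD st.1 (st.2 + (w.length : Int) - 1) 1, st.2 + (w.length : Int))

-- A's whole loop over " ".join(ws)[:-1] computes the same labels as B's loop over ws[:-1]
lemma pv_foldA_chain : ∀ (ws : List (List Char)) (t : List Char) (s : Nat)
    (L : List Int) (n : Int),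
    (∀ w ∈ ws, w ≠ [] ∧ ∀ c ∈ w, c ≠ ' ') → ws ≠ [] →
    t.drop s = [' '].intercalate ws →
    ((PySem.List.enumerate (([' '].intercalate ws).dropLast) (s : Int)).foldl
        (pvStepA t) (L, n)).1 =
      ((ws.dropLast).foldl pvStepC (L, n)).1 := by
  intro ws
  induction ws with
  | nil => intro t s L n _ h _; exact absurd rfl h
  | cons w rest ih =>
    intro t s L n hws _ hdrop
    have hw : w ≠ [] := (hws w (by simp)).1
    have hwns : ∀ c ∈ w, c ≠ ' ' := (hws w (by simp)).2
    cases rest with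
    | nil =>
      rw [pv_inter_singleton] at hdrop ⊢
      have hsplit : t.drop s = w.dropLast ++ w.getLast hw :: [] := by
        rw [hdrop]; exact (List.dropLast_concat_getLast hw).symm
      have hlast : w.getLast hw ≠ ' ' := hwns _ (List.getLast_mem hw)
      rw [pv_foldA_word w.dropLast t (w.getLast hw) [] s L n
        (fun c hc => hwns c (List.dropLast_subset _ hc)) hsplit]
      simp [hlast]
    | cons y rt =>
      have hrest : (y :: rt) ≠ [] := by simp
      rw [pv_inter_cons] at hdrop
      have hiter_ne : [' '].intercalate (y :: rt) ≠ [] :=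
        pv_inter_ne_nil _ (by simp) (fun v hv => (hws v (by simp [hv])).1)
      have hdrop2 : t.drop s = w ++ ' ' :: [' '].intercalate (y :: rt) := by
        rw [hdrop]; simp
      -- dropLast of the whole join
      have hshape : ([' '].intercalate (w :: y :: rt)).dropLast
          = w ++ ' ' :: ([' '].intercalate (y :: rt)).dropLast := by
        rw [pv_inter_cons, List.append_assoc, List.dropLast_append_of_ne_nil (by simp),
          List.singleton_append, List.dropLast_cons_of_ne_nil hiter_ne]
      rw [hshape, PySem.List.enumerate_append, List.foldl_append,
        pv_foldA_word w t ' ' ([' '].intercalate (y :: rt)) s L n hwns hdrop2]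
      rw [if_pos (⟨rfl, hw⟩ : (' ' = ' ') ∧ w ≠ [])]
      simp only [PySem.List.enumerate_cons, List.foldl_cons]
      have hskip : ∀ (st : List Int × Int) (i : Int), pvStepA t st (i, ' ') = st := by
        intro st i; unfold pvStepA; simp
      rw [hskip]
      have hdrop3 : t.drop (s + w.length + 1) = [' '].intercalate (y :: rt) := by
        have : t.drop (s + w.length + 1) = (t.drop s).drop (w.length + 1) := by
          rw [List.drop_drop, Nat.add_assoc]
        rw [this, hdrop2]
        simp
      have hcast : ((s : Int) + (w.length : Int) + 1) = ((s + w.length + 1 : Nat) : Int) := by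
        push_cast; ring
      rw [hcast, ih t (s + w.length + 1) (PySem.List.pySetD L (n + w.length - 1) 1)
        (n + w.length) (fun v hv => hws v (by simp [hv])) (by simp) hdrop3]
      have : (w :: y :: rt).dropLast = w :: (y :: rt).dropLast := by
        simp
      rw [this, List.foldl_cons]
      rfl

-- main equivalence, assembled from the lemmas above
lemma pv_main (line : String) : make_pairs_from_line line = make_pairs_from_line_alt line := by
  have hspace : PySem.Chars.isspace ' ' = true := by decide
  have hsp : PySem.Str.split₀ (PySem.Str.strip line) = PySem.Str.split₀ line := by
    unfold PySem.Str.split₀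
    rw [PySem.Str.toList_strip, pv_split₀_strip]
  have hwords : PySem.Str.split₀ line = List.map String.ofList (PySem.Chars.split₀ line.toList) := by
    unfold PySem.Str.split₀; rfl
  have hnice : ∀ w ∈ PySem.Chars.split₀ line.toList, w ≠ [] ∧ ∀ c ∈ w, c ≠ ' ' := by
    intro w hw
    obtain ⟨h1, h2⟩ := pv_split₀_words line.toList w hw
    refine ⟨h1, fun c hc hceq => ?_⟩
    have := h2 c hc
    rw [hceq, hspace] at this
    simp at this
  have hts : (PySem.Str.join " " (List.map String.ofList (PySem.Chars.split₀ line.toList))).toList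
      = [' '].intercalate (PySem.Chars.split₀ line.toList) := by
    rw [PySem.Str.toList_join]
    show PySem.Chars.join [' '] _ = _
    rw [List.map_map]
    have : (String.toList ∘ String.ofList) = id := by
      funext l; simp [String.toList_ofList]
    rw [this, List.map_id]
    rfl
  simp only [make_pairs_from_line, make_pairs_from_line_alt, hsp, hwords]
  generalize hws : PySem.Chars.split₀ line.toList = ws0 at hts hnice
  cases ws0 with
  | nil =>
    -- no words: A's normalized line is empty, B's word list is empty
    have hempty : PySem.Str.join " " (List.map String.ofList ([] : List (List Char))) = "" := by
      apply String.toList_inj.mp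
      rw [hts]; rfl
    rw [hempty]
    simp
  | cons w0 ws' =>
    set ws0 := w0 :: ws' with hws0
    set line2 := PySem.Str.join " " (List.map String.ofList ws0) with hline2
    have hne : ws0 ≠ [] := by simp [hws0]
    have hlen2 : PySem.Str.len line2 = ((ws0.flatten.length + ws0.length - 1 : Nat) : Int) := by
      show ((line2.toList.length : Nat) : Int) = _
      rw [hts, pv_len_inter ws0 hne]
    have hflatB : (PySem.Str.join "" (List.map String.ofList ws0)).toList = ws0.flatten := by
      rw [PySem.Str.toList_join]
      show PySem.Chars.join [] _ = _
      rw [List.map_map]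
      have h4 : (String.toList ∘ String.ofList) = id := by
        funext l; simp [String.toList_ofList]
      rw [h4, List.map_id]
      exact pv_inter_nil_flatten ws0
    have hlenB : PySem.Str.len (PySem.Str.join "" (List.map String.ofList ws0))
        = ((ws0.flatten.length : Nat) : Int) := by
      show ((_ : Nat) : Int) = _
      rw [hflatB]
    by_cases hsmall : ws0.flatten.length + ws0.length - 1 < 3
    · rw [if_pos (Or.inr (by rw [hlen2]; omega))]
      rw [if_neg (by simp), if_pos (by rw [hlenB]; simp only [List.length_map]; omega)]
    · have hne2 : line2 ≠ "" := by
        intro h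
        have h5 := congrArg String.toList h
        rw [hts] at h5
        exact pv_inter_ne_nil ws0 hne (fun w hw => (hnice w hw).1) (by simpa using h5)
      rw [if_neg (by rw [not_or]; exact ⟨hne2, by rw [hlen2]; omega⟩)]
      rw [if_neg (by simp), if_neg (by rw [hlenB]; simp only [List.length_map]; omega)]
      have hno : PySem.Str.replace line2 " " "" = PySem.Str.join "" (List.map String.ofList ws0) := by
        apply String.toList_inj.mp
        rw [PySem.Str.toList_replace, hflatB]
        show PySem.Chars.replace line2.toList [' '] [] = _
        rw [hts, pv_replace_space, pv_filter_inter ws0 (fun w hw => (hnice w hw).2)]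
      have hfold : ∀ (L : List Int),
          (List.foldl (pvStepA line2.toList) (L, 0)
            (PySem.List.enumerate ((PySem.Str.slice line2 none (some (-1))).toList) 0)).1
          = (List.foldl pvStepB (L, 0)
              (PySem.List.slice (List.map String.ofList ws0) none (some (-1)))).1 := by
        intro L
        rw [PySem.Str.slice_to_neg_one, hts, pv_slice_neg_one, ← List.map_dropLast,
          List.foldl_map]
        have hstep : ∀ (st : List Int × Int) (w : List Char),
            pvStepB st (String.ofList w) = pvStepC st w := by
          intro st w; unfold pvStepB pvStepC
          simp [PySem.Str.len, String.toList_ofList]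
        simp only [hstep]
        have h0 : ((0 : Nat) : Int) = 0 := by norm_num
        rw [← h0]
        exact pv_foldA_chain ws0 ([' '].intercalate ws0) 0 L (((0 : Nat) : Int)) hnice hne
          (by simp)
      rw [hno, hfold]

-- ===== VERDICT (by name: the statement is the Claim_ definition above) =====
theorem make_pairs_from_line_spec : Claim_equal_make_pairs_from_line := by
  intro line _
  exact pv_main line
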